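-- pv_equiv track=rewrite | github.com/YounSangWoo/SWJG_weekly | week1/week01_exam_local/1924.py | month_to_day
-- ===== SOURCE A (Python) =====
-- def month_to_day(m):
--     sum = 0
--     for i in range (1, m):
--         if i in [1, 3, 5, 7 , 8, 10, 12]:
--             sum += 31
--         elif i in [4, 6, 9, 11]:
--             sum += 30
--         elif i == 2 :
--             sum += 28
--     return sum
-- ===== SOURCE B (Python) =====
-- def month_to_day(m):
--     cum = [0]
--     for d in [31, 28, 31, 30, 31, 30, 31, 31, 30, 31, 30, 31]:
--         cum.append(cum[-1] + d)
--     return cum[max(0, min(m - 1, 12))]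
-- ===== Notes on version B (the rewrite author's own statement) =====
-- stated objective: faster
-- what changed: Replaced the per-month scanning loop with membership tests by a prefix-sum table of month lengths and a single clamped table lookup.
import Mathlib
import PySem

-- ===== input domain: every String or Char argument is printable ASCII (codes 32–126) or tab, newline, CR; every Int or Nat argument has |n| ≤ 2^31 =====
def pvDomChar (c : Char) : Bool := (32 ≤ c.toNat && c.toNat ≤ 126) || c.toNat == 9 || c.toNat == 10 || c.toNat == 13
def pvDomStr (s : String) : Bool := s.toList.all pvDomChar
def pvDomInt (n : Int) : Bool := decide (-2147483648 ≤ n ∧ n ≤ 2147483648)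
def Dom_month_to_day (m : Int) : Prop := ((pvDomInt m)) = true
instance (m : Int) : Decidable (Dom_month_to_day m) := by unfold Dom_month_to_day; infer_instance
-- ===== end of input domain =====

-- B replaces A's scanning loop with a prefix-sum table of month lengths and one clamped lookup (idiomatic).


-- ===== PORT A =====
def mtdStep (sum : Int) (i : Int) : Int :=
  if i ∈ ([1, 3, 5, 7, 8, 10, 12] : List Int) then sum + 31
  else if i ∈ ([4, 6, 9, 11] : List Int) then sum + 30
  else if i = 2 then sum + 28
  else sum

def month_to_day (m : Int) : Int :=
  (PySem.List.pyRange 1 m 1).foldl mtdStep 0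

-- ===== PORT B =====
-- cum[-1] is always in range here; the none branch is unreachable (cum is never empty).
def mtdCum : List Int :=
  ([31, 28, 31, 30, 31, 30, 31, 31, 30, 31, 30, 31] : List Int).foldl
    (fun c d => c ++ [(PySem.List.pyGet? c (-1)).getD 0 + d]) [0]

def month_to_day_alt (m : Int) : Int :=
  (PySem.List.pyGet? mtdCum (max 0 (min (m - 1) 12))).getD 0

-- ===== PRECONDITION & SPEC =====
def Spec_month_to_day (m : Int) (out : Int) : Prop := out = month_to_day_alt m
instance (m : Int) (out : Int) : Decidable (Spec_month_to_day m out) := by unfold Spec_month_to_day; infer_instance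

-- ===== CLAIM (what is proved, stated in full; the proofs are below) =====
def Claim_equal_month_to_day : Prop := ∀ (m : Int), Dom_month_to_day m → Spec_month_to_day m (month_to_day m)

-- ===== LEMMAS AND PROOFS =====
theorem mtdStep_big (s i : Int) (h : 13 ≤ i) : mtdStep s i = s := by
  unfold mtdStep
  rw [if_neg (by simp only [List.mem_cons, List.not_mem_nil, or_false]; omega),
     if_neg (by simp only [List.mem_cons, List.not_mem_nil, or_false]; omega),
     if_neg (by omega)]

theorem foldl_mtdStep_big (l : List Int) (hl : ∀ i ∈ l, 13 ≤ i) (s : Int) :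
    l.foldl mtdStep s = s := by
  induction l generalizing s with
  | nil => rfl
  | cons a t ih =>
      simp only [List.foldl_cons]
      rw [mtdStep_big s a (hl a (by simp))]
      exact ih (fun i hi => hl i (by simp [hi])) s

theorem month_to_day_big (m : Int) (h : 13 ≤ m) : month_to_day m = 365 := by
  unfold month_to_day
  rw [PySem.List.pyRange_one_append 1 13 m (by omega) h, List.foldl_append]
  have h1 : (PySem.List.pyRange 1 13 1).foldl mtdStep 0 = 365 := by decide
  rw [h1]
  exact foldl_mtdStep_big _ (fun i hi => ((PySem.List.mem_pyRange_one).1 hi).1) 365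

theorem month_to_day_spec : Claim_equal_month_to_day := by
  intro m _
  unfold Spec_month_to_day
  by_cases hlo : m ≤ 0
  · have h1 : month_to_day m = 0 := by
      unfold month_to_day
      rw [PySem.List.pyRange_one_eq_nil (by omega)]; rfl
    have h2 : month_to_day_alt m = 0 := by
      unfold month_to_day_alt
      have : max 0 (min (m - 1) 12) = 0 := by omega
      rw [this]; decide
    rw [h1, h2]
  · by_cases hhi : 13 ≤ m
    · have h2 : month_to_day_alt m = 365 := by
        unfold month_to_day_alt
        have : max 0 (min (m - 1) 12) = 12 := by omega
        rw [this]; decide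
      rw [month_to_day_big m hhi, h2]
    · interval_cases m <;> decide
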